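-- pv_equiv track=rewrite | github.com/MrBrantCode/unitest_baseline | mut_generate/mist_train_taco/taco_15582/solution.py | calculate_game_score
-- ===== SOURCE A (Python) =====
-- def calculate_game_score(N, Z, W, a):
--     if N == 1:
--         return abs(a[0] - W)
--
--     x = [-1] * N
--     y = [-1] * N
--
--     x[N - 1] = abs(a[N - 1] - W)
--     y[N - 2] = abs(a[N - 1] - a[N - 2])
--
--     for i in range(N - 2, -1, -1):
--         x[i] = abs(a[i] - a[N - 1])
--         for j in range(i + 1, N - 1):
--             x[i] = min(x[i], y[j])
--
--         y[i] = abs(a[N - 1] - a[i])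
--         for j in range(i + 1, N - 1):
--             y[i] = max(y[i], x[j])
--
--     return max(x)
-- ===== SOURCE B (Python) =====
-- # B: one downward pass keeping running suffix-min of y and suffix-max of x (O(N) instead of A's O(N^2)).
-- def calculate_game_score(N, Z, W, a):
--     if N == 1:
--         return abs(a[0] - W)
--     last = a[N - 1]
--     best = abs(last - W)
--     ymin = None  # min of y[j] over already-processed j (i+1 .. N-2)
--     xmax = None  # max of x[j] over already-processed j (i+1 .. N-2)
--     for i in range(N - 2, -1, -1):
--         d = abs(a[i] - last)
--         xi = d if ymin is None else min(d, ymin)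
--         yi = d if xmax is None else max(d, xmax)
--         best = max(best, xi)
--         ymin = yi if ymin is None else min(ymin, yi)
--         xmax = xi if xmax is None else max(xmax, xi)
--     return best
-- ===== Notes on version B (the rewrite author's own statement) =====
-- stated objective: faster
-- what changed: A fills x/y arrays with an inner rescan of all previously computed suffix entries at every outer step; B does a single downward pass keeping a running suffix-min of y and suffix-max of x (and the running answer), so the arrays and inner loops disappear.
import Mathlib
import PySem

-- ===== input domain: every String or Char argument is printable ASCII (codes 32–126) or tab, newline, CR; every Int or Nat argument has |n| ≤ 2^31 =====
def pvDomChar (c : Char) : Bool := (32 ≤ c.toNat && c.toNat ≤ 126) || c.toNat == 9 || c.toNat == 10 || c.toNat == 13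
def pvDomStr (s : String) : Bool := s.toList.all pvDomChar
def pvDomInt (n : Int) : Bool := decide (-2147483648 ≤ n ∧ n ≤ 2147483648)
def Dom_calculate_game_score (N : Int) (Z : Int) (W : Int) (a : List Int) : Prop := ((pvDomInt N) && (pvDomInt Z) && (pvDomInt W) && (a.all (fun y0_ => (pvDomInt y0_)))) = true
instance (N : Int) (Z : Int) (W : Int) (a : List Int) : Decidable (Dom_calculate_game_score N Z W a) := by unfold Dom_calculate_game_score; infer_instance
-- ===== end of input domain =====

-- B replaces A's O(N^2) nested suffix min/max scans by one O(N) downward pass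
-- carrying a running suffix-min of y and suffix-max of x (return value only; no mutation).

-- ===== PORT A =====
-- inner loop 'for j in range(i+1, N-1): acc = min(acc, y[j])'
def pvInnerMin (N : Int) (yl : List Int) (i : Int) (d : Int) : Int :=
  (PySem.List.pyRange (i+1) (N-1) 1).foldl (fun acc j => min acc (PySem.List.pyGetD yl j 0)) d

-- inner loop 'for j in range(i+1, N-1): acc = max(acc, x[j])'
def pvInnerMax (N : Int) (xl : List Int) (i : Int) (d : Int) : Int :=
  (PySem.List.pyRange (i+1) (N-1) 1).foldl (fun acc j => max acc (PySem.List.pyGetD xl j 0)) d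

-- one iteration of A's outer loop (state = the lists x, y)
def pvStepA (a : List Int) (N : Int) (st : List Int × List Int) (i : Int) : List Int × List Int :=
  let xi := pvInnerMin N st.2 i |PySem.List.pyGetD a i 0 - PySem.List.pyGetD a (N-1) 0|
  let xl := PySem.List.pySetD st.1 i xi
  let yi := pvInnerMax N xl i |PySem.List.pyGetD a (N-1) 0 - PySem.List.pyGetD a i 0|
  (xl, PySem.List.pySetD st.2 i yi)

def calculate_game_score (N : Int) (Z : Int) (W : Int) (a : List Int) : Int :=
  if N = 1 then |PySem.List.pyGetD a 0 0 - W|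
  else
    let x0 := PySem.List.pySetD (List.replicate N.toNat (-1:Int)) (N-1)
                |PySem.List.pyGetD a (N-1) 0 - W|
    let y0 := PySem.List.pySetD (List.replicate N.toNat (-1:Int)) (N-2)
                |PySem.List.pyGetD a (N-1) 0 - PySem.List.pyGetD a (N-2) 0|
    let st := (PySem.List.pyRange (N-2) (-1) (-1)).foldl (pvStepA a N) (x0, y0)
    (PySem.List.max? st.1 (fun v => v)).getD 0

-- ===== PORT B =====
-- one iteration of B's single pass (state = (ymin, xmax, best))
def pvStepB (a : List Int) (last : Int) (st : Option Int × Option Int × Int) (i : Int) :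
    Option Int × Option Int × Int :=
  let d := |PySem.List.pyGetD a i 0 - last|
  let xi := match st.1 with | none => d | some m => min d m
  let yi := match st.2.1 with | none => d | some m => max d m
  (some (match st.1 with | none => yi | some m => min m yi),
   some (match st.2.1 with | none => xi | some m => max m xi),
   max st.2.2 xi)

def calculate_game_score_alt (N : Int) (Z : Int) (W : Int) (a : List Int) : Int :=
  if N = 1 then |PySem.List.pyGetD a 0 0 - W|
  else
    let last := PySem.List.pyGetD a (N-1) 0
    ((PySem.List.pyRange (N-2) (-1) (-1)).foldl (pvStepB a last)
      (none, none, |last - W|)).2.2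

-- ===== PRECONDITION & SPEC =====
-- exactly the inputs on which A returns (otherwise a[…] raises IndexError / max([]) raises)
def Pre_calculate_game_score (N : Int) (Z : Int) (W : Int) (a : List Int) : Prop :=
  1 ≤ N ∧ N ≤ (a.length : Int)
instance (N : Int) (Z : Int) (W : Int) (a : List Int) : Decidable (Pre_calculate_game_score N Z W a) := by unfold Pre_calculate_game_score; infer_instance
def pvWitness_calculate_game_score : Int × Int × Int × List Int := (3, 0, 2, [4, -1, 7])

def Spec_calculate_game_score (N : Int) (Z : Int) (W : Int) (a : List Int) (out : Int) : Prop := out = calculate_game_score_alt N Z W a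
instance (N : Int) (Z : Int) (W : Int) (a : List Int) (out : Int) : Decidable (Spec_calculate_game_score N Z W a out) := by unfold Spec_calculate_game_score; infer_instance

-- ===== CLAIM (what is proved, stated in full; the proofs are below) =====
def Claim_equal_calculate_game_score : Prop := ∀ (N : Int) (Z : Int) (W : Int) (a : List Int), Dom_calculate_game_score N Z W a → Pre_calculate_game_score N Z W a → Spec_calculate_game_score N Z W a (calculate_game_score N Z W a)

-- ===== LEMMAS AND PROOFS =====
def pvOMin (d : Int) (o : Option Int) : Int := match o with | none => d | some m => min d m
def pvOMax (d : Int) (o : Option Int) : Int := match o with | none => d | some m => max d m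

lemma pv_set_replicate (m : Nat) (c v : Int) (xs : List Int) :
    (List.replicate (m+1) c ++ xs).set m v = List.replicate m c ++ v :: xs := by
  induction m with
  | zero => simp
  | succ n ih =>
    rw [List.replicate_succ, List.cons_append, List.set_cons_succ, ih,
        List.replicate_succ, List.cons_append]

lemma pv_foldl_max_comm (t : List Int) : ∀ a b : Int, t.foldl max (max a b) = max a (t.foldl max b) := by
  induction t with
  | nil => intro a b; rfl
  | cons c t ih =>
    intro a b
    simp only [List.foldl_cons]
    rw [show max (max a b) c = max a (max b c) by omega, ih]

lemma pv_pyGetD_append_eq (p q t : List Int) (hpq : p.length = q.length) (j : Int)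
    (hj : (p.length:Int) ≤ j) :
    PySem.List.pyGetD (p ++ t) j 0 = PySem.List.pyGetD (q ++ t) j 0 := by
  have h0 : 0 ≤ j := le_trans (by positivity) hj
  rw [← Int.toNat_of_nonneg h0, PySem.List.pyGetD_natCast, PySem.List.pyGetD_natCast,
      List.getD_eq_getElem?_getD, List.getD_eq_getElem?_getD,
      List.getElem?_append_right (by omega), List.getElem?_append_right (by omega), hpq]

lemma pv_pyGetD_boundary (m : Nat) (c v : Int) (t : List Int) :
    PySem.List.pyGetD (List.replicate m c ++ v :: t) ((m:Nat):Int) 0 = v := by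
  rw [PySem.List.pyGetD_natCast, List.getD_eq_getElem?_getD,
      List.getElem?_append_right (by simp)]
  simp

lemma pv_loop (a : List Int) (N : Int) (hN : 2 ≤ N) :
    ∀ (k : Nat), (k:Int) ≤ N - 1 →
    ∀ (xs yl : List Int) (ymin xmax : Option Int) (best : Int),
      yl.length = N.toNat →
      (k:Int) + (xs.length:Int) = N →
      (∀ d, (PySem.List.pyRange (k:Int) (N-1) 1).foldl
          (fun acc j => min acc (PySem.List.pyGetD yl j 0)) d = pvOMin d ymin) →
      (∀ d, (PySem.List.pyRange (k:Int) (N-1) 1).foldl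
          (fun acc j => max acc (PySem.List.pyGetD (List.replicate k (-1) ++ xs) j 0)) d = pvOMax d xmax) →
      PySem.List.max? xs (fun v => v) = some best →
      0 ≤ best →
      (PySem.List.max? ((PySem.List.pyRange ((k:Int)-1) (-1) (-1)).foldl (pvStepA a N)
          (List.replicate k (-1) ++ xs, yl)).1 (fun v => v)).getD 0
        = ((PySem.List.pyRange ((k:Int)-1) (-1) (-1)).foldl
            (pvStepB a (PySem.List.pyGetD a (N-1) 0)) (ymin, xmax, best)).2.2 := by
  intro k
  induction k with
  | zero =>
    intro _ xs yl ymin xmax best _ _ _ _ hmax _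
    rw [show ((0:Nat):Int) - 1 = -1 by norm_num,
        PySem.List.pyRange_neg_one_eq_nil (le_refl _)]
    simp [hmax]
  | succ m ih =>
    intro hk xs yl ymin xmax best hylen hxlen hymin hxmax hmax hbest
    have hcast : ((m+1:Nat):Int) = (m:Int) + 1 := by push_cast; ring
    have hm1 : ((m+1:Nat):Int) - 1 = (m:Int) := by omega
    have hmN : (m:Int) < N - 1 := by omega
    have hxllen : (List.replicate (m+1) (-1:Int) ++ xs).length = N.toNat := by
      simp; omega
    rw [hm1, PySem.List.pyRange_neg_one_cons (by omega : (-1:Int) < (m:Int))]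
    simp only [List.foldl_cons]
    -- characterize the A-step
    have hsetx : PySem.List.pySetD (List.replicate (m+1) (-1:Int) ++ xs) (m:Int)
        (pvInnerMin N yl (m:Int) |PySem.List.pyGetD a (m:Int) 0 - PySem.List.pyGetD a (N-1) 0|)
        = List.replicate m (-1:Int) ++
            (pvInnerMin N yl (m:Int) |PySem.List.pyGetD a (m:Int) 0 - PySem.List.pyGetD a (N-1) 0|) :: xs := by
      rw [PySem.List.pySetD_natCast, pv_set_replicate]
    have hcastm : ((m:Nat):Int) + 1 = ((m+1:Nat):Int) := by omega
    have hxi : ∀ d, pvInnerMin N yl ((m:Nat):Int) d = pvOMin d ymin := by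
      intro d; unfold pvInnerMin; rw [hcastm]; exact hymin d
    have hyi : ∀ d, pvInnerMax N
        (List.replicate m (-1:Int) ++
          (pvInnerMin N yl (m:Int) |PySem.List.pyGetD a (m:Int) 0 - PySem.List.pyGetD a (N-1) 0|) :: xs)
        ((m:Nat):Int) d = pvOMax d xmax := by
      intro d; unfold pvInnerMax
      have hc := PySem.List.foldl_congr_mem' (PySem.List.pyRange ((m:Int)+1) (N-1) 1)
        (fun acc j => max acc (PySem.List.pyGetD (List.replicate m (-1:Int) ++
          (pvInnerMin N yl (m:Int) |PySem.List.pyGetD a (m:Int) 0 - PySem.List.pyGetD a (N-1) 0|) :: xs) j 0))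
        (fun acc j => max acc (PySem.List.pyGetD (List.replicate (m+1) (-1:Int) ++ xs) j 0)) d
        (by
          intro j hj acc
          obtain ⟨h1, _⟩ := PySem.List.mem_pyRange_one.mp hj
          rw [List.append_cons]
          exact congrArg (max acc) (pv_pyGetD_append_eq
            (List.replicate m (-1:Int) ++
              [pvInnerMin N yl (m:Int) |PySem.List.pyGetD a (m:Int) 0 - PySem.List.pyGetD a (N-1) 0|])
            (List.replicate (m+1) (-1:Int)) xs (by simp) j (by simp; omega)))
      rw [hc, hcastm]; exact hxmax d
    have hstepB : pvStepB a (PySem.List.pyGetD a (N-1) 0) (ymin, xmax, best) (m:Int)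
        = (some (pvOMin (pvOMax |PySem.List.pyGetD a (m:Int) 0 - PySem.List.pyGetD a (N-1) 0| xmax) ymin),
           some (pvOMax (pvOMin |PySem.List.pyGetD a (m:Int) 0 - PySem.List.pyGetD a (N-1) 0| ymin) xmax),
           max best (pvOMin |PySem.List.pyGetD a (m:Int) 0 - PySem.List.pyGetD a (N-1) 0| ymin)) := by
      cases ymin <;> cases xmax <;> simp [pvStepB, pvOMin, pvOMax, min_comm, max_comm]
    simp only [pvStepA]
    rw [show |PySem.List.pyGetD a (N-1) 0 - PySem.List.pyGetD a (m:Int) 0|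
          = |PySem.List.pyGetD a (m:Int) 0 - PySem.List.pyGetD a (N-1) 0| from abs_sub_comm _ _,
        hsetx, hyi, hstepB, hxi]
    refine ih (by omega)
      (pvOMin |PySem.List.pyGetD a (m:Int) 0 - PySem.List.pyGetD a (N-1) 0| ymin :: xs)
      (PySem.List.pySetD yl (m:Int)
        (pvOMax |PySem.List.pyGetD a (m:Int) 0 - PySem.List.pyGetD a (N-1) 0| xmax))
      _ _ _ ?_ ?_ ?_ ?_ ?_ ?_
    · rw [PySem.List.length_pySetD]; exact hylen
    · simp only [List.length_cons]; push_cast at hxlen ⊢; omega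
    · -- new running suffix-min invariant for y
      intro d'
      rw [PySem.List.pyRange_one_cons hmN, List.foldl_cons,
          PySem.List.pyGetD_pySetD_natCast yl m m _ 0 (by omega)]
      rw [if_pos rfl]
      have hc := PySem.List.foldl_congr_mem' (PySem.List.pyRange ((m:Int)+1) (N-1) 1)
        (fun acc j => min acc (PySem.List.pyGetD (PySem.List.pySetD yl (m:Int)
          (pvOMax |PySem.List.pyGetD a (m:Int) 0 - PySem.List.pyGetD a (N-1) 0| xmax)) j 0))
        (fun acc j => min acc (PySem.List.pyGetD yl j 0))
        (min d' (pvOMax |PySem.List.pyGetD a (m:Int) 0 - PySem.List.pyGetD a (N-1) 0| xmax))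
        (by
          intro j hj acc
          obtain ⟨h1, _⟩ := PySem.List.mem_pyRange_one.mp hj
          have hj0 : (0:Int) ≤ j := by omega
          exact congrArg (min acc) (by
            rw [← Int.toNat_of_nonneg hj0,
                PySem.List.pyGetD_pySetD_natCast yl m j.toNat _ 0 (by omega),
                if_neg (by omega)]))
      rw [hc, hcastm, hymin]
      cases ymin <;> simp [pvOMin]
    · -- new running suffix-max invariant for x
      intro d'
      rw [PySem.List.pyRange_one_cons hmN, List.foldl_cons, pv_pyGetD_boundary]
      have := hyi (max d' (pvOMin |PySem.List.pyGetD a (m:Int) 0 - PySem.List.pyGetD a (N-1) 0| ymin))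
      rw [hxi] at this
      unfold pvInnerMax at this
      rw [hcastm] at this ⊢
      rw [this]
      cases xmax <;> simp [pvOMax]
    · -- the running best is max? of the set part of x
      cases xs with
      | nil =>
        rw [(PySem.List.max?_eq_none_iff [] (fun v : Int => v)).mpr rfl] at hmax
        cases hmax
      | cons h t =>
        rw [PySem.List.max?_id_cons] at hmax ⊢
        have hb := Option.some.inj hmax
        simp only [List.foldl_cons]
        rw [pv_foldl_max_comm, hb]
        exact congrArg some (by omega)
    · exact le_trans hbest (le_max_left _ _)

-- ===== VERDICT (by name: the statement is the Claim_ definition above) =====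
theorem calculate_game_score_spec : Claim_equal_calculate_game_score := by
  intro N Z W a _ hPre
  obtain ⟨h1, h2⟩ := hPre
  unfold Spec_calculate_game_score
  by_cases hN1 : N = 1
  · simp [calculate_game_score, calculate_game_score_alt, hN1]
  · have hN : 2 ≤ N := by omega
    have hk : (((N-1).toNat : Nat) : Int) = N - 1 := Int.toNat_of_nonneg (by omega)
    have hx0 : PySem.List.pySetD (List.replicate N.toNat (-1:Int)) (N-1)
        |PySem.List.pyGetD a (N-1) 0 - W|
        = List.replicate (N-1).toNat (-1:Int) ++ [|PySem.List.pyGetD a (N-1) 0 - W|] := by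
      rw [← hk, PySem.List.pySetD_natCast, show N.toNat = (N-1).toNat + 1 by omega,
          ← List.append_nil (List.replicate ((N-1).toNat+1) (-1:Int)), pv_set_replicate]
      simp
    have hmain := pv_loop a N hN (N-1).toNat (by omega)
      [|PySem.List.pyGetD a (N-1) 0 - W|]
      (PySem.List.pySetD (List.replicate N.toNat (-1:Int)) (N-2)
        |PySem.List.pyGetD a (N-1) 0 - PySem.List.pyGetD a (N-2) 0|)
      none none (|PySem.List.pyGetD a (N-1) 0 - W|)
      (by rw [PySem.List.length_pySetD, List.length_replicate])
      (by simp only [List.length_singleton]; omega)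
      (by intro d; rw [hk, PySem.List.pyRange_one_eq_nil (le_refl _)]; rfl)
      (by intro d; rw [hk, PySem.List.pyRange_one_eq_nil (le_refl _)]; rfl)
      (by rw [PySem.List.max?_id_cons]; rfl)
      (abs_nonneg _)
    rw [hk, show N - 1 - 1 = N - 2 from by ring] at hmain
    simp only [calculate_game_score, calculate_game_score_alt, if_neg hN1]
    rw [hx0]
    exact hmain
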